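-- pv_equiv track=rewrite | github.com/carlosmcastro/PlanetAPP-BACKEND- | exoplanets.py | concor
-- ===== SOURCE A (Python) =====
-- def concor(nombre, nombres_t):
-- 	#nombre con mayor cantidad de caracteres en comun.
-- 	co_nombre = set(nombre)
-- 	similar = [(len(co_nombre&set(i)) ,i) for i in nombres_t]
-- 	maximos = max(similar, key=lambda x: x[0])
--
-- 	#Se filtran los valores maximos.
-- 	primer_sel = [*filter(lambda x: x[0]==maximos[0], similar)]
--
-- 	#Si no es único, compara si por cada caracter en comun posee la misma cantidad de coincidencias.
-- 	if len(primer_sel)-1: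
-- 		sumada = [sum([1 for i in co_nombre if v.count(i) == nombre.count(i)]) for u, v in primer_sel]
-- 		segunda_sel = primer_sel[sumada.index(max(sumada))][1]
-- 	else:
-- 		segunda_sel = maximos[1]
-- 	return segunda_sel
-- ===== SOURCE B (Python) =====
-- def concor(nombre, nombres_t):
-- 	co = set(nombre)
-- 	def key(name):
-- 		return (len(co & set(name)),
-- 			sum(1 for c in co if name.count(c) == nombre.count(c)))
-- 	return max(nombres_t, key=key)
-- ===== Notes on version B (the rewrite author's own statement) =====
-- stated objective: simpler
-- what changed: Replaces A's three-stage flow (build (score,name) list, max by first score, filter the ties, rescan ties with a second score and list.index) by a single max over nombres_t with one composite tuple key (intersection size, count-match score); Python's first-maximum rule of max preserves A's first-occurrence tie-breaking.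
import Mathlib
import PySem

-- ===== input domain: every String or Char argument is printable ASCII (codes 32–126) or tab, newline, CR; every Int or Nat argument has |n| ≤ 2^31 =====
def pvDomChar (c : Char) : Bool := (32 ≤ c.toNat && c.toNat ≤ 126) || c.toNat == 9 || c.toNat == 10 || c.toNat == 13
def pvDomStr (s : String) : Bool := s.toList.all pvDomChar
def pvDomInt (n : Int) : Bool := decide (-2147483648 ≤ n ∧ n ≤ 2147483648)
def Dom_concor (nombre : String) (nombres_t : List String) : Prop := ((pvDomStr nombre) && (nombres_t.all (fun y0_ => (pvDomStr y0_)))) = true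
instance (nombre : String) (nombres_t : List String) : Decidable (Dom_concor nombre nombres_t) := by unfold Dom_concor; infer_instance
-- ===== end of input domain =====

-- B replaces A's three-stage max/filter-ties/rescan flow by one max over a composite
-- (intersection-size, count-match) key; objective: simpler, same asymptotic cost.

-- ===== PORT A =====
def concor (nombre : String) (nombres_t : List String) : String :=
  -- co_nombre = set(nombre)
  let co_nombre : PySem.Set Char := PySem.Set.ofList nombre.toList
  -- similar = [(len(co_nombre&set(i)), i) for i in nombres_t]
  let similar := nombres_t.map (fun i =>
    (PySem.Set.len (PySem.Set.inter co_nombre (PySem.Set.ofList i.toList)), i))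
  -- maximos = max(similar, key=lambda x: x[0])   (ValueError on empty → none, excluded by Pre_)
  match PySem.List.max? similar (fun x => x.1) with
  | none => ""
  | some maximos =>
    -- primer_sel = [*filter(lambda x: x[0]==maximos[0], similar)]
    let primer_sel := similar.filter (fun x => x.1 == maximos.1)
    -- if len(primer_sel)-1:
    if (primer_sel.length : Int) - 1 ≠ 0 then
      -- sumada = [sum([1 for i in co_nombre if v.count(i) == nombre.count(i)]) for u, v in primer_sel]
      let sumada := primer_sel.map (fun uv =>
        (((co_nombre.filter (fun i =>
            PySem.Str.count uv.2 (String.mk [i]) == PySem.Str.count nombre (String.mk [i]))).map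
          (fun _ => (1 : Int))).sum))
      -- segunda_sel = primer_sel[sumada.index(max(sumada))][1]
      match PySem.List.max? sumada (fun x => x) with
      | none => ""
      | some mx =>
        match PySem.List.index? sumada mx with
        | none => ""
        | some j => ((PySem.List.pyGet? primer_sel (j : Int)).map (fun p => p.2)).getD ""
    else maximos.2

-- ===== PORT B =====
def concor_alt (nombre : String) (nombres_t : List String) : String :=
  -- co = set(nombre)
  let co : PySem.Set Char := PySem.Set.ofList nombre.toList
  -- key(name) = (len(co & set(name)), sum(1 for c in co if name.count(c) == nombre.count(c)))
  -- return max(nombres_t, key=key)   (tuple key → max2?; ValueError on empty → none, excluded by Pre_)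
  (PySem.List.max2? nombres_t
    (fun name => PySem.Set.len (PySem.Set.inter co (PySem.Set.ofList name.toList)))
    (fun name =>
      (((co.filter (fun c =>
          PySem.Str.count name (String.mk [c]) == PySem.Str.count nombre (String.mk [c]))).map
        (fun _ => (1 : Int))).sum))).getD ""

-- ===== PRECONDITION & SPEC =====
-- Pre_ excludes only the empty list, on which Python's max (in both A and B) raises ValueError.
def Pre_concor (nombre : String) (nombres_t : List String) : Prop := nombres_t ≠ []
instance (nombre : String) (nombres_t : List String) : Decidable (Pre_concor nombre nombres_t) := by unfold Pre_concor; infer_instance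
def pvWitness_concor : String × List String := ("abc", ["ab", "b", "cab"])

def Spec_concor (nombre : String) (nombres_t : List String) (out : String) : Prop := out = concor_alt nombre nombres_t
instance (nombre : String) (nombres_t : List String) (out : String) : Decidable (Spec_concor nombre nombres_t out) := by unfold Spec_concor; infer_instance

-- ===== CLAIM (what is proved, stated in full; the proofs are below) =====
def Claim_equal_concor : Prop := ∀ (nombre : String) (nombres_t : List String), Dom_concor nombre nombres_t → Pre_concor nombre nombres_t → Spec_concor nombre nombres_t (concor nombre nombres_t)

-- ===== LEMMAS AND PROOFS =====

-- find? only looks at members: congruence under a member-wise equal predicate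
theorem pv_find?_congr {α : Type} {p q : α → Bool} : ∀ (l : List α),
    (∀ x ∈ l, p x = q x) → l.find? p = l.find? q := by
  intro l
  induction l with
  | nil => intro _; rfl
  | cons a t ih =>
    intro h
    have ha := h a (by simp)
    simp only [List.find?_cons, ha]
    cases q a with
    | true => rfl
    | false => exact ih (fun x hx => h x (by simp [hx]))

-- the element at the first index satisfying p is what find? returns
theorem pv_find?_of_first {α : Type} {p : α → Bool} : ∀ (l : List α) (j : Nat) (hj : j < l.length),
    p l[j] = true → (∀ i (hi : i < j), p (l[i]'(by omega)) = false) → l.find? p = some l[j] := by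
  intro l
  induction l with
  | nil => intro j hj; simp at hj
  | cons a t ih =>
    intro j hj hpj hlt
    cases j with
    | zero => simp_all
    | succ k =>
      have ha : p a = false := hlt 0 (Nat.succ_pos k)
      simp only [List.find?_cons, ha]
      exact ih k (by simpa using hj) (by simpa using hpj)
        (fun i hi => hlt (i+1) (by omega))

-- the left-fold running-first-max IS find? of the global-max predicate
theorem pv_foldl_max_eq_find? {α κ : Type} [LinearOrder κ] (key : α → κ) :
    ∀ (xs : List α) (a : α),
      List.foldl (fun acc x => match acc with
          | none => some x
          | some m => if key m < key x then some x else some m) (some a) xs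
        = (a :: xs).find? (fun z => decide (∀ y ∈ a :: xs, key y ≤ key z)) := by
  intro xs
  induction xs with
  | nil => intro a; simp
  | cons x t ih =>
    intro a
    by_cases h : key a < key x
    · -- accumulator replaced by x
      have h1 : (fun z => decide (∀ y ∈ a :: x :: t, key y ≤ key z))
          = (fun z => decide (∀ y ∈ x :: t, key y ≤ key z)) := by
        funext z
        rw [decide_eq_decide]
        constructor
        · intro hz y hy; exact hz y (by simp at hy ⊢; tauto)
        · intro hz y hy
          rcases List.mem_cons.1 hy with rfl | hy
          · exact le_trans (le_of_lt h) (hz x (by simp))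
          · exact hz y hy
      have ha : (decide (∀ y ∈ a :: x :: t, key y ≤ key a)) = false := by
        simp only [decide_eq_false_iff_not]
        intro hz
        exact absurd (hz x (by simp)) (not_le.2 h)
      calc List.foldl _ (some a) (x :: t)
          = List.foldl (fun acc x => match acc with
              | none => some x
              | some m => if key m < key x then some x else some m) (some x) t := by
            simp [h]
        _ = (x :: t).find? (fun z => decide (∀ y ∈ x :: t, key y ≤ key z)) := ih x
        _ = (a :: x :: t).find? (fun z => decide (∀ y ∈ a :: x :: t, key y ≤ key z)) := by
            rw [← h1]
            simp only [List.find?_cons, ha]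
    · -- accumulator stays a;  key x ≤ key a
      have hxa : key x ≤ key a := not_lt.1 h
      have h1 : (fun z => decide (∀ y ∈ a :: x :: t, key y ≤ key z))
          = (fun z => decide (∀ y ∈ a :: t, key y ≤ key z)) := by
        funext z
        rw [decide_eq_decide]
        constructor
        · intro hz y hy; exact hz y (by simp at hy ⊢; tauto)
        · intro hz y hy
          rcases List.mem_cons.1 hy with rfl | hy
          · exact hz y (by simp)
          · rcases List.mem_cons.1 hy with rfl | hy
            · exact le_trans hxa (hz a (by simp))
            · exact hz y (by simp [hy])
      have step : List.foldl (fun acc x => match acc with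
          | none => some x
          | some m => if key m < key x then some x else some m) (some a) (x :: t)
          = List.foldl (fun acc x => match acc with
          | none => some x
          | some m => if key m < key x then some x else some m) (some a) t := by
        simp [h]
      rw [step, ih a, h1]
      -- goal: find? q (a :: t) = find? q (a :: x :: t) for q z = decide (∀ y ∈ a :: t, …)
      by_cases hqa : (decide (∀ y ∈ a :: t, key y ≤ key a)) = true
      · simp only [List.find?_cons, hqa]
      · have hqa' : (decide (∀ y ∈ a :: t, key y ≤ key a)) = false := by
          simpa using hqa
        have hqx : (decide (∀ y ∈ a :: t, key y ≤ key x)) = false := by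
          simp only [decide_eq_false_iff_not] at hqa' ⊢
          intro hz
          exact hqa' (fun y hy => le_trans (hz y hy) hxa)
        simp only [List.find?_cons, hqa', hqx]

theorem pv_max?_eq_find? {α κ : Type} [LinearOrder κ] (key : α → κ) (xs : List α) :
    PySem.List.max? xs key = xs.find? (fun z => decide (∀ y ∈ xs, key y ≤ key z)) := by
  cases xs with
  | nil => rfl
  | cons x t =>
    rw [show PySem.List.max? (x :: t) key
        = List.foldl (fun acc x => match acc with
            | none => some x
            | some m => if key m < key x then some x else some m) (some x) t from rfl,
      pv_foldl_max_eq_find? key t x]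

-- max2? with Int keys is max? of the lexicographic combined key
theorem pv_max2?_eq_max? {α : Type} (xs : List α) (k1 k2 : α → Int) :
    PySem.List.max2? xs k1 k2 = PySem.List.max? xs (fun x => toLex (k1 x, k2 x)) := by
  unfold PySem.List.max2? PySem.List.max?
  congr 1
  funext acc x
  cases acc with
  | none => rfl
  | some m =>
    by_cases hlt : toLex (k1 m, k2 m) < toLex (k1 x, k2 x)
    · have hb : (decide (k1 m < k1 x) || !decide (k1 x < k1 m) && decide (k2 m < k2 x)) = true := by
        rw [Prod.Lex.lt_iff] at hlt
        simp only [ofLex_toLex] at hlt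
        simp only [Bool.or_eq_true, Bool.and_eq_true, Bool.not_eq_true', decide_eq_true_eq,
          decide_eq_false_iff_not]
        omega
      simp [hb, hlt]
    · have hb : (decide (k1 m < k1 x) || !decide (k1 x < k1 m) && decide (k2 m < k2 x)) = false := by
        rw [Prod.Lex.lt_iff] at hlt
        simp only [ofLex_toLex] at hlt
        simp only [Bool.or_eq_false_iff, Bool.and_eq_false_iff, Bool.not_eq_false', decide_eq_true_eq,
          decide_eq_false_iff_not]
        omega
      simp [hb, hlt]

-- the generic heart: A's two-stage selection equals one lexicographic first-max
theorem pv_generic (f g : String → Int) (xs : List String) (hx : xs ≠ []) :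
    (let similar := xs.map (fun i => (f i, i));
     match PySem.List.max? similar (fun x => x.1) with
     | none => ""
     | some maximos =>
       let primer_sel := similar.filter (fun x => x.1 == maximos.1)
       if (primer_sel.length : Int) - 1 ≠ 0 then
         let sumada := primer_sel.map (fun uv => g uv.2)
         match PySem.List.max? sumada (fun x => x) with
         | none => ""
         | some mx =>
           match PySem.List.index? sumada mx with
           | none => ""
           | some j => ((PySem.List.pyGet? primer_sel (j : Int)).map (fun p => p.2)).getD ""
       else maximos.2)
    = (PySem.List.max2? xs f g).getD "" := by
  simp only []
  set sim := xs.map (fun i => (f i, i)) with hsim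
  cases hM : PySem.List.max? sim (fun x => x.1) with
  | none =>
    exfalso
    rw [PySem.List.max?_eq_none_iff] at hM
    exact hx (by simpa [hsim] using hM)
  | some m =>
    obtain ⟨x0, hx0mem, hx0⟩ := List.mem_map.1 (PySem.List.max?_mem hM)
    have hm1 : m.1 = f x0 := by rw [← hx0]
    have hm2 : m.2 = x0 := by rw [← hx0]
    have hfmax : ∀ z ∈ xs, f z ≤ f x0 := by
      intro z hz
      have := PySem.List.max?_isMax hM (f z, z) (List.mem_map.2 ⟨z, hz, rfl⟩)
      simpa [hm1] using this
    -- primer_sel = (xs.filter (f · = f x0)).map pair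
    have hP : sim.filter (fun x => x.1 == m.1)
        = (xs.filter (fun z => f z == f x0)).map (fun i => (f i, i)) := by
      rw [hsim, List.filter_map]
      congr 1
      apply List.filter_congr
      intro z _
      show (f z == m.1) = (f z == f x0)
      rw [hm1]
    set T := xs.filter (fun z => f z == f x0) with hT
    have hx0T : x0 ∈ T := List.mem_filter.2 ⟨hx0mem, by simp⟩
    -- RHS as a find?
    dsimp only
    have hB : (PySem.List.max2? xs f g).getD ""
        = (xs.find? (fun z => decide (∀ y ∈ xs, toLex (f y, g y) ≤ toLex (f z, g z)))).getD "" := by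
      rw [pv_max2?_eq_max?, pv_max?_eq_find?]
    -- the bridge between predicates, given the secondary max value s over T
    have bridge : ∀ s : Int, (∃ w ∈ T, g w = s) → (∀ w ∈ T, g w ≤ s) →
        ∀ z ∈ xs, (decide (f z = f x0) && decide (g z = s))
          = decide (∀ y ∈ xs, toLex (f y, g y) ≤ toLex (f z, g z)) := by
      intro s ⟨w, hwT, hws⟩ hsmax z hz
      obtain ⟨hwxs, hwf⟩ := List.mem_filter.1 hwT
      have hwf : f w = f x0 := by simpa using hwf
      by_cases hb : ∀ y ∈ xs, toLex (f y, g y) ≤ toLex (f z, g z)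
      · have h1 := hb w hwxs
        rw [Prod.Lex.le_iff] at h1
        have hzle : f z ≤ f x0 := hfmax z hz
        have hzf : f z = f x0 := by
          rcases h1 with h1 | h1
          · exact absurd (lt_of_lt_of_le (by simpa [hwf] using h1) hzle) (lt_irrefl _)
          · simp only [ofLex_toLex] at h1; omega
        have hsz : s ≤ g z := by
          rcases h1 with h1 | h1
          · exact absurd (lt_of_lt_of_le (by simpa [hwf] using h1) hzle) (lt_irrefl _)
          · rw [← hws]
            simpa using h1.2
        have hzs : g z ≤ s := hsmax z (List.mem_filter.2 ⟨hz, by simp [hzf]⟩)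
        have hgz : g z = s := le_antisymm hzs hsz
        simp only [hzf, hgz, decide_true, Bool.and_self]
        rw [eq_comm, decide_eq_true_eq]
        intro y hy
        have hby := hb y hy
        rwa [hzf, hgz] at hby
      · have hno : ¬(f z = f x0 ∧ g z = s) := by
          rintro ⟨hzf, hzg⟩
          apply hb
          intro y hy
          rw [Prod.Lex.le_iff]
          rcases lt_or_eq_of_le (hfmax y hy) with hlt | heq
          · exact Or.inl (by simpa [hzf] using hlt)
          · refine Or.inr ⟨by simpa [hzf] using heq, ?_⟩
            have : y ∈ T := List.mem_filter.2 ⟨hy, by simp [heq]⟩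
            simpa [hzg] using hsmax y this
        rcases not_and_or.1 hno with h | h <;> simp [hb, h]
    by_cases hlen : ((sim.filter (fun x => x.1 == m.1)).length : Int) - 1 ≠ 0
    · rw [if_pos hlen]
      have hsum : (sim.filter (fun x => x.1 == m.1)).map (fun uv => g uv.2) = T.map g := by
        rw [hP, List.map_map]; rfl
      have hTne : T ≠ [] := List.ne_nil_of_mem hx0T
      rw [hsum]
      cases hmx : PySem.List.max? (T.map g) (fun x => x) with
      | none =>
        exfalso
        rw [PySem.List.max?_eq_none_iff, List.map_eq_nil_iff] at hmx
        exact hTne hmx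
      | some s =>
        dsimp only
        have hs_max : ∀ w ∈ T, g w ≤ s := by
          intro w hw
          simpa using PySem.List.max?_isMax hmx (g w) (List.mem_map.2 ⟨w, hw, rfl⟩)
        obtain ⟨w, hwT, hws⟩ := List.mem_map.1 (PySem.List.max?_mem hmx)
        cases hidx : PySem.List.index? (T.map g) s with
        | none =>
          exfalso
          rw [PySem.List.index?_eq_none_iff] at hidx
          exact hidx (List.mem_map.2 ⟨w, hwT, hws⟩)
        | some j =>
          dsimp only
          obtain ⟨hjlt, hjv, hjfirst⟩ := PySem.List.getElem_of_index?_eq_some hidx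
          have hjT : j < T.length := by simpa using hjlt
          have hjP : j < (sim.filter (fun x => x.1 == m.1)).length := by
            rw [hP]; simpa using hjT
          rw [PySem.List.pyGet?_natCast, List.getElem?_eq_getElem hjP]
          have hPj : (sim.filter (fun x => x.1 == m.1))[j]'hjP = (f (T[j]'hjT), T[j]'hjT) := by
            simp [hP]
          rw [hB]
          have hgTj : g (T[j]'hjT) = s := by simpa using hjv
          have hfirst : ∀ i (hi : i < j), (g (T[i]'(by omega)) = s) → False := by
            intro i hi hgi
            exact hjfirst i (by simpa using hi) (by simpa using hgi)
          have hfindT : T.find? (fun z => decide (g z = s)) = some (T[j]'hjT) := by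
            apply pv_find?_of_first T j hjT (by simpa using hgTj)
            intro i hi
            simp only [decide_eq_false_iff_not]
            exact fun hgi => hfirst i hi hgi
          have hfindxs : xs.find? (fun z => decide (f z = f x0) && decide (g z = s))
              = some (T[j]'hjT) := by
            rw [← hfindT, hT, List.find?_filter]
            apply pv_find?_congr
            intro z _
            simp
          have hbr := bridge s ⟨w, hwT, hws⟩ hs_max
          rw [pv_find?_congr xs (fun z hz => (hbr z hz).symm), hfindxs]
          simp [hPj]
    · rw [if_neg hlen]
      have hlenP : (sim.filter (fun x => x.1 == m.1)).length = T.length := by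
        rw [hP, List.length_map]
      have hlen1 : T.length = 1 := by
        rw [hlenP] at hlen
        omega
      obtain ⟨t, ht⟩ := List.length_eq_one_iff.1 hlen1
      have hTx0 : T = [x0] := by
        have h := hx0T
        rw [ht] at h
        rw [ht, show t = x0 from (List.mem_singleton.1 h).symm]
      have huniq : ∀ z ∈ xs, f z = f x0 → z = x0 := by
        intro z hz hzf
        have : z ∈ T := List.mem_filter.2 ⟨hz, by simp [hzf]⟩
        rw [hTx0] at this
        simpa using this
      have hpred : (decide (∀ y ∈ xs, toLex (f y, g y) ≤ toLex (f x0, g x0))) = true := by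
        simp only [decide_eq_true_eq]
        intro y hy
        rw [Prod.Lex.le_iff]
        rcases lt_or_eq_of_le (hfmax y hy) with hlt | heq
        · exact Or.inl (by simpa using hlt)
        · have : y = x0 := huniq y hy heq
          subst this
          exact Or.inr ⟨rfl, le_refl _⟩
      have hsome : (xs.find? (fun z => decide (∀ y ∈ xs, toLex (f y, g y) ≤ toLex (f z, g z)))).isSome := by
        rw [List.find?_isSome]
        exact ⟨x0, hx0mem, hpred⟩
      obtain ⟨z, hzfind⟩ := Option.isSome_iff_exists.1 hsome
      have hzx0 : z = x0 := by
        have hz1 := List.find?_some hzfind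
        simp only [decide_eq_true_eq] at hz1
        have h2 := hz1 x0 hx0mem
        rw [Prod.Lex.le_iff] at h2
        apply huniq z (List.mem_of_find?_eq_some hzfind)
        rcases h2 with h2 | h2
        · exact absurd (lt_of_lt_of_le (by simpa using h2) (hfmax z (List.mem_of_find?_eq_some hzfind))) (lt_irrefl _)
        · simpa using h2.1.symm
      rw [hB, hzfind, hzx0]
      simp [hm2]

-- ===== VERDICT (by name: the statement is the Claim_ definition above) =====
theorem concor_spec : Claim_equal_concor := by
  intro nombre nombres_t _ hpre
  unfold Spec_concor
  exact pv_generic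
    (fun name => PySem.Set.len (PySem.Set.inter (PySem.Set.ofList nombre.toList) (PySem.Set.ofList name.toList)))
    (fun name =>
      ((((PySem.Set.ofList nombre.toList).filter (fun c =>
          PySem.Str.count name (String.mk [c]) == PySem.Str.count nombre (String.mk [c]))).map
        (fun _ => (1 : Int))).sum))
    nombres_t hpre
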